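-- pv_equiv track=rewrite | github.com/valliv2007/Algorithmic-Tasks | How_Many_Numbers.py | check_sum_dig
-- ===== SOURCE A (Python) =====
-- def check_sum_dig(arr, max_sum):
--     if len(arr) == 4:
--         return sum(arr) <= max_sum
--     else:
--         summ = sum(arr[:4])
--         if summ > max_sum:
--             return False
--         for i in range(4, len(arr)):
--             summ = summ + arr[i] - arr[i - 4]
--             if summ > max_sum:
--                 return False
--         return True
-- ===== SOURCE B (Python) =====
-- def check_sum_dig(arr, max_sum):
--     if len(arr) <= 4:
--         return sum(arr) <= max_sum
--     return all(sum(arr[i:i + 4]) <= max_sum for i in range(len(arr) - 3))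
-- ===== Notes on version B (the rewrite author's own statement) =====
-- stated objective: simpler
-- what changed: Replaces the incrementally maintained sliding sum (summ += arr[i] - arr[i-4]) with independent recomputation of each 4-window sum via all() over slices, folding the len==4 branch and the short-array behaviour into one len<=4 guard.
import Mathlib
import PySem

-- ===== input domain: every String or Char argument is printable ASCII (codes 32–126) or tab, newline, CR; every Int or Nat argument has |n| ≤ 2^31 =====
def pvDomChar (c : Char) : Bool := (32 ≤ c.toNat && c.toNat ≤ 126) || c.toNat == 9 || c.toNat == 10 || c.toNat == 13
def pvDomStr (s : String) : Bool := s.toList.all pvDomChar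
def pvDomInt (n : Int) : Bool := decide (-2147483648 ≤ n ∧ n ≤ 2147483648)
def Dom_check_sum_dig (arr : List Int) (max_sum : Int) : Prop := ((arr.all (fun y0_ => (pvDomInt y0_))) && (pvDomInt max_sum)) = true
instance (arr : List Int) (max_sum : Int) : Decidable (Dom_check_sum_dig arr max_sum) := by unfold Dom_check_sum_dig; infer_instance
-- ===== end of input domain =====

-- B replaces A's incrementally-maintained sliding sum (with early return) by an `all` over
-- independently recomputed 4-window slice sums, folding the len==4 branch into one len<=4 guard;
-- objective: simpler.


-- ===== PORT A =====
-- body of A's 'for i in range(4, len(arr))' loop; Python's early 'return False' is encoded as the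
-- sticky Bool flag in the state (the running sum is maintained exactly as in A)
def check_sum_dig_step (arr : List Int) (max_sum : Int) (st : Int × Bool) (i : Int) : Int × Bool :=
  let summ' := st.1 + PySem.List.pyGetD arr i 0 - PySem.List.pyGetD arr (i - 4) 0
  (summ', st.2 && decide (¬ summ' > max_sum))

def check_sum_dig (arr : List Int) (max_sum : Int) : Bool :=
  if arr.length = 4 then decide (arr.sum ≤ max_sum)
  else
    let summ := (PySem.List.slice arr none (some 4)).sum
    if summ > max_sum then false
    else ((PySem.List.pyRange 4 (arr.length : Int) 1).foldl (check_sum_dig_step arr max_sum) (summ, true)).2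

-- ===== PORT B =====
def check_sum_dig_alt (arr : List Int) (max_sum : Int) : Bool :=
  if arr.length ≤ 4 then decide (arr.sum ≤ max_sum)
  else (PySem.List.pyRange 0 ((arr.length : Int) - 3) 1).all
        (fun i => decide ((PySem.List.slice arr (some i) (some (i + 4))).sum ≤ max_sum))

-- ===== PRECONDITION & SPEC =====
def Spec_check_sum_dig (arr : List Int) (max_sum : Int) (out : Bool) : Prop := out = check_sum_dig_alt arr max_sum
instance (arr : List Int) (max_sum : Int) (out : Bool) : Decidable (Spec_check_sum_dig arr max_sum out) := by unfold Spec_check_sum_dig; infer_instance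

-- ===== CLAIM (what is proved, stated in full; the proofs are below) =====
def Claim_equal_check_sum_dig : Prop := ∀ (arr : List Int) (max_sum : Int), Dom_check_sum_dig arr max_sum → Spec_check_sum_dig arr max_sum (check_sum_dig arr max_sum)

-- ===== LEMMAS AND PROOFS =====

-- sum of the 4-element window of arr starting at position k
def W (arr : List Int) (k : Nat) : Int := ((arr.drop k).take 4).sum

lemma W_eq (arr : List Int) (k : Nat) (h : k + 4 ≤ arr.length) :
    W arr k = arr.getD k 0 + arr.getD (k+1) 0 + arr.getD (k+2) 0 + arr.getD (k+3) 0 := by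
  have hd : arr.drop k = arr[k]'(by omega) :: arr[k+1]'(by omega) :: arr[k+2]'(by omega)
      :: arr[k+3]'(by omega) :: arr.drop (k+4) := by
    rw [List.drop_eq_getElem_cons (show k < arr.length by omega),
        List.drop_eq_getElem_cons (show k+1 < arr.length by omega),
        List.drop_eq_getElem_cons (show k+2 < arr.length by omega),
        List.drop_eq_getElem_cons (show k+3 < arr.length by omega)]
  rw [W, hd, List.getD_eq_getElem arr 0 (show k < arr.length by omega),
      List.getD_eq_getElem arr 0 (show k+1 < arr.length by omega),
      List.getD_eq_getElem arr 0 (show k+2 < arr.length by omega),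
      List.getD_eq_getElem arr 0 (show k+3 < arr.length by omega)]
  show ([arr[k]'(by omega), arr[k+1]'(by omega), arr[k+2]'(by omega), arr[k+3]'(by omega)]).sum = _
  simp; ring

lemma W_succ (arr : List Int) (k : Nat) (h : k + 4 < arr.length) :
    W arr (k + 1) = W arr k + arr.getD (k + 4) 0 - arr.getD k 0 := by
  rw [W_eq arr k (by omega), W_eq arr (k+1) (by omega)]
  simp only [show k+1+1 = k+2 from rfl, show k+1+2 = k+3 from rfl, show k+1+3 = k+4 from rfl]
  ring

lemma slice_eq_W (arr : List Int) (k : Nat) :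
    (PySem.List.slice arr (some (k : Int)) (some ((k : Int) + 4))).sum = W arr k := by
  rw [show ((k:Int)+4) = ((k:Int) + ((4:Nat):Int)) by norm_num, PySem.List.slice_natCast_add]
  rfl

lemma step_eq (arr : List Int) (max_sum : Int) (k : Nat) (b : Bool) (h : k + 4 < arr.length) :
    check_sum_dig_step arr max_sum (W arr k, b) ((k:Int)+4)
      = (W arr (k+1), b && decide (¬ W arr (k+1) > max_sum)) := by
  rw [check_sum_dig_step]
  have hg : W arr k + PySem.List.pyGetD arr ((k:Int)+4) 0 - PySem.List.pyGetD arr ((k:Int)+4-4) 0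
      = W arr (k+1) := by
    rw [show ((k:Int)+4) = (((k+4 : Nat)) : Int) by omega, PySem.List.pyGetD_natCast,
        show (((k+4:Nat)):Int)-4 = ((k:Nat):Int) by omega, PySem.List.pyGetD_natCast,
        W_succ arr k h]
  simp only [hg]

lemma fold_eq (arr : List Int) (max_sum : Int) :
    ∀ m k (b : Bool), k + 4 ≤ arr.length → arr.length - (k+4) = m →
    ((PySem.List.pyRange ((k:Int)+4) (arr.length:Int) 1).foldl
        (check_sum_dig_step arr max_sum) (W arr k, b)).2
      = (b && (PySem.List.pyRange ((k:Int)+1) ((arr.length:Int)-3) 1).all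
          (fun i => decide ((PySem.List.slice arr (some i) (some (i+4))).sum ≤ max_sum))) := by
  intro m
  induction m with
  | zero =>
    intro k b h1 h2
    rw [PySem.List.pyRange_one_eq_nil (by omega), PySem.List.pyRange_one_eq_nil (by omega)]
    simp
  | succ m ih =>
    intro k b h1 h2
    have hlt : k + 4 < arr.length := by omega
    rw [PySem.List.pyRange_one_cons (by omega),
        PySem.List.pyRange_one_cons (show (k:Int)+1 < (arr.length:Int)-3 by omega),
        List.foldl_cons, step_eq arr max_sum k b hlt, List.all_cons]
    have ih' := ih (k+1) (b && decide (¬ W arr (k+1) > max_sum)) (by omega) (by omega)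
    rw [show (((k+1:Nat)):Int)+4 = (k:Int)+4+1 by omega,
        show (((k+1:Nat)):Int)+1 = (k:Int)+1+1 by omega] at ih'
    rw [ih', show ((k:Int)+1) = ((k+1 : Nat) : Int) by omega]
    rw [slice_eq_W, Bool.and_assoc,
        decide_eq_decide.mpr (show ¬ W arr (k+1) > max_sum ↔ W arr (k+1) ≤ max_sum from not_lt)]

lemma check_sum_dig_eq_alt (arr : List Int) (max_sum : Int) :
    check_sum_dig arr max_sum = check_sum_dig_alt arr max_sum := by
  rw [check_sum_dig, check_sum_dig_alt]
  by_cases h4 : arr.length = 4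
  · rw [if_pos h4, if_pos (by omega)]
  · rw [if_neg h4]
    by_cases hle : arr.length ≤ 4
    · rw [if_pos hle]
      have hs : PySem.List.slice arr none (some 4) = arr := by
        rw [PySem.List.slice_to (xs := arr) (b := 4) (by norm_num)]
        exact List.take_of_length_le (by omega)
      have hr : PySem.List.pyRange 4 (arr.length:Int) 1 = [] :=
        PySem.List.pyRange_one_eq_nil (by omega)
      simp only [hs, hr, List.foldl_nil]
      split_ifs with hgt
      · exact (decide_eq_false (by omega)).symm
      · exact (decide_eq_true (by omega)).symm
    · rw [if_neg hle]
      have h5 : 4 < arr.length := by omega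
      have hs : (PySem.List.slice arr none (some 4)).sum = W arr 0 := by
        rw [PySem.List.slice_to (xs := arr) (b := 4) (by norm_num)]; rfl
      have h00 : (PySem.List.slice arr (some 0) (some (0+4))).sum = W arr 0 := by
        have := slice_eq_W arr 0
        simpa using this
      have hr0 : PySem.List.pyRange 0 ((arr.length:Int)-3) 1
          = 0 :: PySem.List.pyRange 1 ((arr.length:Int)-3) 1 :=
        PySem.List.pyRange_one_cons (by omega)
      have hf := fold_eq arr max_sum (arr.length - (0+4)) 0 true (by omega) rfl
      rw [show (((0:Nat)):Int)+4 = (4:Int) by norm_num,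
          show (((0:Nat)):Int)+1 = (1:Int) by norm_num, Bool.true_and] at hf
      simp only [hs, hr0, List.all_cons]
      rw [h00]
      split_ifs with hgt
      · rw [decide_eq_false (show ¬ W arr 0 ≤ max_sum by omega), Bool.false_and]
      · rw [hf, decide_eq_true (show W arr 0 ≤ max_sum by omega), Bool.true_and]

-- ===== VERDICT (by name: the statement is the Claim_ definition above) =====
theorem check_sum_dig_spec : Claim_equal_check_sum_dig := by
  intro arr max_sum _
  unfold Spec_check_sum_dig
  exact check_sum_dig_eq_alt arr max_sum
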